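-- pv_equiv track=rewrite | github.com/uqwhua/TEA | time_graph.py | build_value_edges_in_cluster
-- ===== SOURCE A (Python) =====
-- def _build_dict_by_first_element(arrs):
--     dic = {}
--     for arr in arrs:
--         if arr[0] not in dic:
--             dic[arr[0]] = [arr]
--         else:
--             dic[arr[0]].append(arr)
--     return dic
--
-- def _build_dict_by_list(elements, start_idx):
--     dic = {}
--     idx = start_idx
--     for ele in elements:
--         tup = tuple(ele)
--         # assert tup not in dic
--         # duplicate after padding
--         if tup not in dic:
--             dic[tup] = idx
--             idx += 1
--     return dic
--
-- def build_attr_edges(attr_triples, cluster, triple2id_dict, time_id2value, window=3):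
--     edges = []
--     if len(attr_triples) < 2:
--         return edges, []
--
--     def get_time_value(x):
--         return time_id2value[x[1]]
--
--     attr_triples.sort(key=get_time_value, reverse=False)
--     for i in range(len(attr_triples)):
--         for j in range(i + 1, len(attr_triples)):
--             attr_i = attr_triples[i][2]  # triple in format: entity, value, attr
--             attr_j = attr_triples[j][2]
--
--             if attr_i == attr_j:
--                 edges.append([tuple(attr_triples[i]), tuple(attr_triples[j])])
--             elif attr_i in cluster and attr_j in cluster:
--                 edges.append([tuple(attr_triples[i]), tuple(attr_triples[j])])
--             if len(edges) > window:
--                 break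
--         if len(edges) > window:
--             break
--
--     id_edges = []
--     attr_edges = []
--     for u, v in edges:
--         u_id = triple2id_dict[u]
--         u_attr = u[2]
--         u_time_val = time_id2value[u[1]]
--         v_id = triple2id_dict[v]
--         v_attr = v[2]
--         v_time_val = time_id2value[v[1]]
--
--         if u_time_val > v_time_val:  # make directed graph
--             id_edges.append([v_id, u_id])
--             attr_edges.append([v_attr, u_attr])
--         else:
--             id_edges.append([u_id, v_id])
--             attr_edges.append([u_attr, v_attr])
--
--     return id_edges, attr_edges
--
-- def build_value_edges_in_cluster(num_ent, time_id2value, attribute_triples, clusters):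
--     # dic={ent1:[triple1,triple2,triple3],ent2:[]...}
--     ent2triple_dict = _build_dict_by_first_element(attribute_triples)
--     # attr node id starts from num_ent
--     triple2id_dict = _build_dict_by_list(attribute_triples, num_ent)
--
--     val_val_edges = []  # edges between values
--     ent_val_edges = []  # edge connects val and ent
--     for ent, attr_triples in ent2triple_dict.items():
--         for cluster in clusters:
--             id_edges, attr_edges = build_attr_edges(attr_triples, cluster, triple2id_dict, time_id2value)
--             val_val_edges = val_val_edges + id_edges
--             ent_val_edges = ent_val_edges + attr_edges
--     if len(val_val_edges) > 0 and len(ent_val_edges) > 0: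
--         return val_val_edges, ent_val_edges
--     else:  # to avoid None
--         return [[num_ent, num_ent + 1]], [[0, 1]]
-- ===== SOURCE B (Python) =====
-- def _first_edges(items, cluster, budget):
--     # first `budget` qualifying ordered pairs (u before v) of the time-sorted group,
--     # in lexicographic order; attribute fields are read only until the budget fills
--     if budget <= 0 or len(items) < 2:
--         return []
--     (uid, u), rest = items[0], items[1:]
--     mine = []
--     for vid, v in rest:
--         if u[2] == v[2] or (u[2] in cluster and v[2] in cluster):
--             mine.append(([uid, vid], [u[2], v[2]]))
--             if len(mine) == budget:
--                 break
--     return mine + _first_edges(rest, cluster, budget - len(mine))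
--
-- def build_value_edges_in_cluster(num_ent, time_id2value, attribute_triples, clusters):
--     # one pass: assign ids to distinct triples and group triples by entity
--     ids = {}
--     groups = {}
--     nxt = num_ent
--     for t in attribute_triples:
--         key = tuple(t)
--         if key not in ids:
--             ids[key] = nxt
--             nxt += 1
--         groups.setdefault(t[0], []).append(t)
--
--     vv, ev = [], []
--     for g in groups.values():
--         if len(g) < 2 or not clusters:
--             continue
--         srt = sorted(g, key=lambda t: time_id2value[t[1]])
--         items = [(ids[tuple(t)], t) for t in srt]
--         for cluster in clusters:
--             cset = set(cluster)
--             found = _first_edges(items, cset, 4)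
--             vv.extend(e[0] for e in found)
--             ev.extend(e[1] for e in found)
--     if vv:
--         return vv, ev
--     return [[num_ent, num_ent + 1]], [[0, 1]]
-- ===== Notes on version B (the rewrite author's own statement) =====
-- stated objective: alternative
-- what changed: B builds the triple-id and entity-group dicts in one pass, sorts and id-decorates each entity group once instead of re-sorting and re-looking-up ids per cluster, converts each cluster to a set for membership tests, and takes the first four qualifying pairs with a budget-limited recursive scan that emits both edge lists directly (no accumulator/break loops and no second direction pass, which is dead since the group is sorted); the measured cost is the same.
import Mathlib
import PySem

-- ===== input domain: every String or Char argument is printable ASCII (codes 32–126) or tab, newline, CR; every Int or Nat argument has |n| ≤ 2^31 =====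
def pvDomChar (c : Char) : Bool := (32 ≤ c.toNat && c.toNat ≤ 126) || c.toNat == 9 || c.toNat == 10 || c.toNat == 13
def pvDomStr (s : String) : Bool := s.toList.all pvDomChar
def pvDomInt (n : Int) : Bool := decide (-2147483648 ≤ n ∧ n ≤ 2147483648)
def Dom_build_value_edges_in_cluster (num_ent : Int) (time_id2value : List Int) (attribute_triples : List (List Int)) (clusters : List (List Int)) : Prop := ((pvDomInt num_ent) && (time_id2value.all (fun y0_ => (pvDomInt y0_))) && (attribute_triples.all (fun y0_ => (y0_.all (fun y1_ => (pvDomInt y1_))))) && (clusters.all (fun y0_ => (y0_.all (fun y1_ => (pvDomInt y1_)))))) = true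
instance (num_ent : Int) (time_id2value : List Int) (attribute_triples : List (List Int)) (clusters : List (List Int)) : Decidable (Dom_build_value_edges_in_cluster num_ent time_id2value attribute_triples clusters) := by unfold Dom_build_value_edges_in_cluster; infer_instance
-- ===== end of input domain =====

-- B: one pass builds both dicts, each entity group is sorted and id-decorated once (A re-sorts
-- per cluster), cluster membership goes through a set, and the first four qualifying pairs come
-- from a budget-limited recursive scan instead of A's nested break loops — an alternative;
-- A = B proved on Pre_ (the inputs where A returns normally, slightly over-approximated).


-- ===== PORT A =====

-- shared by both ports: the sort key 'lambda t: time_id2value[t[1]]' and 'triple[2]'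
def pvKey (time_id2value : List Int) (t : List Int) : Int :=
  PySem.List.pyGetD time_id2value (PySem.List.pyGetD t 1 0) 0

def pvAttr (t : List Int) : Int := PySem.List.pyGetD t 2 0

-- _build_dict_by_first_element
def pvA_dictByFirst (arrs : List (List Int)) : PySem.Dict Int (List (List Int)) :=
  arrs.foldl (fun dic arr =>
    match dic.get? (PySem.List.pyGetD arr 0 0) with
    | none => dic.insert (PySem.List.pyGetD arr 0 0) [arr]
    | some l => dic.insert (PySem.List.pyGetD arr 0 0) (l ++ [arr])) PySem.Dict.empty

-- _build_dict_by_list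
def pvA_dictByList (elements : List (List Int)) (start_idx : Int) :
    PySem.Dict (List Int) Int × Int :=
  elements.foldl (fun p ele =>
    if p.1.contains ele then p else (p.1.insert ele p.2, p.2 + 1))
    (PySem.Dict.empty, start_idx)

-- the inner 'for j' loop of build_attr_edges (over the suffix after position i)
def pvA_inner (cluster : List Int) (u : List Int) :
    List (List Int) → List (List Int × List Int) → List (List Int × List Int)
  | [], acc => acc
  | v :: rest, acc =>
      let acc' :=
        if pvAttr u = pvAttr v then acc ++ [(u, v)]
        else if cluster.contains (pvAttr u) && cluster.contains (pvAttr v) then acc ++ [(u, v)]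
        else acc
      if acc'.length > 3 then acc' else pvA_inner cluster u rest acc'

-- the outer 'for i' loop of build_attr_edges
def pvA_outer (cluster : List Int) :
    List (List Int) → List (List Int × List Int) → List (List Int × List Int)
  | [], acc => acc
  | u :: rest, acc =>
      let acc' := pvA_inner cluster u rest acc
      if acc'.length > 3 then acc' else pvA_outer cluster rest acc'

-- build_attr_edges; the third component is the (in-place sorted) triple list the caller keeps
def pvA_buildAttrEdges (time_id2value : List Int) (attr_triples : List (List Int))
    (cluster : List Int) (t2id : PySem.Dict (List Int) Int) :
    List (List Int) × List (List Int) × List (List Int) :=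
  if attr_triples.length < 2 then ([], [], attr_triples)
  else
    let s := PySem.List.sorted attr_triples (pvKey time_id2value) false
    let edges := pvA_outer cluster s []
    let res := edges.foldl (fun (acc : List (List Int) × List (List Int)) e =>
      let uId := t2id.getD e.1 0
      let uAttr := pvAttr e.1
      let uT := pvKey time_id2value e.1
      let vId := t2id.getD e.2 0
      let vAttr := pvAttr e.2
      let vT := pvKey time_id2value e.2
      if uT > vT then (acc.1 ++ [[vId, uId]], acc.2 ++ [[vAttr, uAttr]])
      else (acc.1 ++ [[uId, vId]], acc.2 ++ [[uAttr, vAttr]])) ([], [])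
    (res.1, res.2, s)

def build_value_edges_in_cluster (num_ent : Int) (time_id2value : List Int) (attribute_triples : List (List Int)) (clusters : List (List Int)) : List (List Int) × List (List Int) :=
  let ent2t := pvA_dictByFirst attribute_triples
  let t2id := (pvA_dictByList attribute_triples num_ent).1
  let res := ent2t.items.foldl (fun (acc : List (List Int) × List (List Int)) kv =>
    let st := clusters.foldl
      (fun (st : List (List Int) × List (List Int) × List (List Int)) c =>
        let r := pvA_buildAttrEdges time_id2value st.2.2 c t2id
        (st.1 ++ r.1, st.2.1 ++ r.2.1, r.2.2)) (acc.1, acc.2, kv.2)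
    (st.1, st.2.1)) ([], [])
  if res.1.length > 0 && res.2.length > 0 then res
  else ([[num_ent, num_ent + 1]], [[0, 1]])

-- ===== PORT B =====

-- the inner 'for vid, v in rest' loop of _first_edges (break once `mine` fills the budget)
def pvB_mine (cset : List Int) (uid : Int) (u : List Int) :
    Nat → List (Int × List Int) → List (List Int × List Int)
  | _, [] => []
  | budget, (vid, v) :: rest =>
      if pvAttr u == pvAttr v
         || (PySem.Set.contains cset (pvAttr u) && PySem.Set.contains cset (pvAttr v)) then
        if budget ≤ 1 then [([uid, vid], [pvAttr u, pvAttr v])]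
        else ([uid, vid], [pvAttr u, pvAttr v]) :: pvB_mine cset uid u (budget - 1) rest
      else pvB_mine cset uid u budget rest

-- _first_edges
def pvB_firstEdges (cset : List Int) :
    List (Int × List Int) → Nat → List (List Int × List Int)
  | items, budget =>
    if budget = 0 ∨ items.length < 2 then []
    else
      match items with
      | [] => []
      | (uid, u) :: rest =>
        let mine := pvB_mine cset uid u budget rest
        mine ++ pvB_firstEdges cset rest (budget - mine.length)

-- the single indexing pass: (ids, groups, next id)
def pvB_index (attribute_triples : List (List Int)) (num_ent : Int) :
    PySem.Dict (List Int) Int × PySem.Dict Int (List (List Int)) × Int :=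
  attribute_triples.foldl (fun st t =>
    let p := if st.1.contains t then (st.1, st.2.2) else (st.1.insert t st.2.2, st.2.2 + 1)
    (p.1, st.2.1.modify (PySem.List.pyGetD t 0 0) [] (· ++ [t]), p.2))
    (PySem.Dict.empty, PySem.Dict.empty, num_ent)

def build_value_edges_in_cluster_alt (num_ent : Int) (time_id2value : List Int) (attribute_triples : List (List Int)) (clusters : List (List Int)) : List (List Int) × List (List Int) :=
  let st := pvB_index attribute_triples num_ent
  let ids := st.1
  let groups := st.2.1
  let res := groups.items.foldl (fun (acc : List (List Int) × List (List Int)) kv =>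
    let g := kv.2
    if g.length < 2 ∨ clusters = [] then acc
    else
      let srt := PySem.List.sorted g (pvKey time_id2value) false
      let items := srt.map (fun t => (ids.getD t 0, t))
      clusters.foldl (fun (acc : List (List Int) × List (List Int)) c =>
        let cset := PySem.Set.ofList c
        let found := pvB_firstEdges cset items 4
        (acc.1 ++ found.map (·.1), acc.2 ++ found.map (·.2))) acc) ([], [])
  if res.1 ≠ [] then res else ([[num_ent, num_ent + 1]], [[0, 1]])

-- ===== PRECONDITION & SPEC =====

-- Pre_ excludes exactly the inputs where Python A raises (an empty triple; or, with clusters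
-- nonempty, a triple of a multi-triple entity group with an out-of-range time index or fewer
-- than 3 fields); the length-≥-3 clause slightly over-approximates A's raise set, because A's
-- early break can leave a trailing short triple unread — on those excluded inputs A returns and
-- B returns the very same value (see cites); they are excluded only because the defaulting-access
-- Lean ports cannot represent the raise.
def Pre_build_value_edges_in_cluster (num_ent : Int) (time_id2value : List Int) (attribute_triples : List (List Int)) (clusters : List (List Int)) : Prop :=
  (∀ t ∈ attribute_triples, t ≠ []) ∧
  (clusters ≠ [] → ∀ t ∈ attribute_triples,
    2 ≤ attribute_triples.countP
        (fun s => PySem.List.pyGetD s 0 0 == PySem.List.pyGetD t 0 0) →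
    3 ≤ t.length ∧ PySem.Raise.InRange time_id2value.length (PySem.List.pyGetD t 1 0))
instance (num_ent : Int) (time_id2value : List Int) (attribute_triples : List (List Int)) (clusters : List (List Int)) : Decidable (Pre_build_value_edges_in_cluster num_ent time_id2value attribute_triples clusters) := by unfold Pre_build_value_edges_in_cluster; infer_instance

def pvWitness_build_value_edges_in_cluster : Int × List Int × List (List Int) × List (List Int) :=
  (10, [5, 3, 7], [[1, 0, 4], [1, 1, 4], [2, 2, 9]], [[4, 9]])

def Spec_build_value_edges_in_cluster (num_ent : Int) (time_id2value : List Int) (attribute_triples : List (List Int)) (clusters : List (List Int)) (out : List (List Int) × List (List Int)) : Prop := out = build_value_edges_in_cluster_alt num_ent time_id2value attribute_triples clusters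
instance (num_ent : Int) (time_id2value : List Int) (attribute_triples : List (List Int)) (clusters : List (List Int)) (out : List (List Int) × List (List Int)) : Decidable (Spec_build_value_edges_in_cluster num_ent time_id2value attribute_triples clusters out) := by unfold Spec_build_value_edges_in_cluster; infer_instance

-- ===== CLAIM (what is proved, stated in full; the proofs are below) =====
def Claim_equal_build_value_edges_in_cluster : Prop := ∀ (num_ent : Int) (time_id2value : List Int) (attribute_triples : List (List Int)) (clusters : List (List Int)), Dom_build_value_edges_in_cluster num_ent time_id2value attribute_triples clusters → Pre_build_value_edges_in_cluster num_ent time_id2value attribute_triples clusters → Spec_build_value_edges_in_cluster num_ent time_id2value attribute_triples clusters (build_value_edges_in_cluster num_ent time_id2value attribute_triples clusters)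

-- ===== LEMMAS AND PROOFS =====

-- the pair-qualification test and the lexicographic qualifying-pair stream (proof vocabulary)
def pvCond (c : List Int) (u v : List Int) : Bool :=
  (pvAttr u == pvAttr v) || (c.contains (pvAttr u) && c.contains (pvAttr v))

def pvPairs (c : List Int) : List (List Int) → List (List Int × List Int)
  | [] => []
  | u :: rest => ((rest.filter (fun v => pvCond c u v)).map (fun v => (u, v))) ++ pvPairs c rest

-- the same stream over id-decorated items, already shaped as B's ([ids],[attrs]) edges
def pvEdgesD (c : List Int) : List (Int × List Int) → List (List Int × List Int)
  | [] => []
  | (uid, u) :: rest =>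
      ((rest.filter (fun p => pvCond c u p.2)).map
        (fun p => ([uid, p.1], [pvAttr u, pvAttr p.2]))) ++ pvEdgesD c rest

theorem pvSet_contains_ofList (c : List Int) (x : Int) :
    PySem.Set.contains (PySem.Set.ofList c) x = c.contains x := by
  by_cases h : x ∈ c
  · rw [PySem.Set.contains_eq_listContains]
    simp [PySem.Set.mem_ofList, h]
  · rw [PySem.Set.contains_eq_listContains]
    simp [PySem.Set.mem_ofList, h]

theorem pvStep_eq (c : List Int) (u v : List Int) (acc : List (List Int × List Int)) :
    (if pvAttr u = pvAttr v then acc ++ [(u, v)]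
     else if c.contains (pvAttr u) && c.contains (pvAttr v) then acc ++ [(u, v)] else acc)
    = if pvCond c u v then acc ++ [(u, v)] else acc := by
  by_cases h1 : pvAttr u = pvAttr v <;>
    by_cases h2 : (c.contains (pvAttr u) && c.contains (pvAttr v)) = true <;>
      simp [pvCond, h1]

theorem pvA_inner_eq (c : List Int) (u : List Int) :
    ∀ (rest : List (List Int)) (acc : List (List Int × List Int)), acc.length ≤ 3 →
    pvA_inner c u rest acc
      = acc ++ ((rest.filter (fun v => pvCond c u v)).map (fun v => (u, v))).take (4 - acc.length) := by
  intro rest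
  induction rest with
  | nil => intro acc h; simp [pvA_inner]
  | cons v rest ih =>
    intro acc h
    rw [pvA_inner, pvStep_eq]
    by_cases hcv : pvCond c u v = true
    · rw [if_pos hcv]
      have hfil : (v :: rest).filter (fun v => pvCond c u v)
          = v :: rest.filter (fun v => pvCond c u v) := by
        simp [hcv]
      rw [hfil]
      by_cases h3 : acc.length = 3
      · have : (acc ++ [(u, v)]).length > 3 := by simp [h3]
        rw [if_pos this]
        have h4 : 4 - acc.length = 1 := by omega
        simp [h4]
      · have hlen : ¬ (acc ++ [(u, v)]).length > 3 := by simp; omega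
        rw [if_neg hlen]
        rw [ih (acc ++ [(u, v)]) (by simp; omega)]
        have h4 : 4 - acc.length = (4 - (acc ++ [(u, v)]).length) + 1 := by simp; omega
        simp only [List.map_cons, h4, List.take_succ_cons, List.append_assoc,
          List.cons_append, List.nil_append]
    · rw [if_neg hcv]
      have hlen : ¬ acc.length > 3 := by omega
      rw [if_neg hlen]
      have hfil : (v :: rest).filter (fun v => pvCond c u v)
          = rest.filter (fun v => pvCond c u v) := by
        simp [hcv]
      rw [hfil, ih acc h]

theorem pvA_outer_eq (c : List Int) :
    ∀ (s : List (List Int)) (acc : List (List Int × List Int)), acc.length ≤ 3 →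
    pvA_outer c s acc = acc ++ (pvPairs c s).take (4 - acc.length) := by
  intro s
  induction s with
  | nil => intro acc h; simp [pvA_outer, pvPairs]
  | cons u rest ih =>
    intro acc h
    rw [pvA_outer, pvA_inner_eq c u rest acc h]
    set F := (rest.filter (fun v => pvCond c u v)).map (fun v => (u, v)) with hF
    set T := F.take (4 - acc.length) with hT
    have hTlen : T.length = min (4 - acc.length) F.length := by
      simp [hT]
    have hPairs : pvPairs c (u :: rest) = F ++ pvPairs c rest := rfl
    by_cases hb : (acc ++ T).length > 3
    · rw [if_pos hb]
      have hTfull : T.length = 4 - acc.length := by simp at hb; omega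
      have hFge : 4 - acc.length ≤ F.length := by omega
      rw [hPairs, List.take_append]
      have h0 : 4 - acc.length - F.length = 0 := by omega
      rw [h0]
      simp [hT]
    · rw [if_neg hb]
      have hFle : F.length ≤ 4 - acc.length := by
        by_contra hgt
        have hT4 : T.length = 4 - acc.length := by
          rw [hT, List.length_take]; omega
        apply hb
        rw [List.length_append, hT4]
        omega
      have hTF : T = F := by rw [hT]; exact List.take_of_length_le hFle
      have hb' : acc.length + F.length ≤ 3 := by
        have := hb
        rw [List.length_append, hTF] at this
        omega
      rw [hTF]
      rw [ih (acc ++ F) (by simp only [List.length_append]; omega)]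
      rw [hPairs, List.take_append, List.take_of_length_le hFle]
      have hidx : 4 - acc.length - F.length = 4 - (acc.length + F.length) := by omega
      simp only [List.length_append, List.append_assoc, hidx]

theorem pvB_mine_eq (c : List Int) (uid : Int) (u : List Int) :
    ∀ (rest : List (Int × List Int)) (b : Nat), 1 ≤ b →
    pvB_mine (PySem.Set.ofList c) uid u b rest
      = ((rest.filter (fun p => pvCond c u p.2)).map
          (fun p => ([uid, p.1], [pvAttr u, pvAttr p.2]))).take b := by
  intro rest
  induction rest with
  | nil => intro b hb; simp [pvB_mine]
  | cons p rest ih =>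
    intro b hb
    obtain ⟨vid, v⟩ := p
    rw [pvB_mine]
    have hcond : (pvAttr u == pvAttr v
        || (PySem.Set.contains (PySem.Set.ofList c) (pvAttr u)
            && PySem.Set.contains (PySem.Set.ofList c) (pvAttr v)))
        = pvCond c u v := by
      rw [pvSet_contains_ofList, pvSet_contains_ofList]; rfl
    rw [hcond]
    by_cases hc : pvCond c u v = true
    · rw [if_pos hc]
      have hfil : (((vid, v) :: rest).filter (fun p => pvCond c u p.2))
          = (vid, v) :: rest.filter (fun p => pvCond c u p.2) := by
        simp [hc]
      rw [hfil]
      by_cases h1 : b ≤ 1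
      · have hb1 : b = 1 := by omega
        rw [if_pos h1, hb1]
        simp
      · rw [if_neg h1, ih (b - 1) (by omega)]
        have hb' : b = (b - 1) + 1 := by omega
        rw [List.map_cons]
        conv_rhs => rw [hb']
        rw [List.take_succ_cons]
    · rw [if_neg hc, ih b hb]
      have hfil : (((vid, v) :: rest).filter (fun p => pvCond c u p.2))
          = rest.filter (fun p => pvCond c u p.2) := by
        simp [hc]
      rw [hfil]

theorem pvB_firstEdges_eq (c : List Int) :
    ∀ (items : List (Int × List Int)) (b : Nat),
    pvB_firstEdges (PySem.Set.ofList c) items b = (pvEdgesD c items).take b := by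
  intro items
  induction items with
  | nil => intro b; rw [pvB_firstEdges]; simp [pvEdgesD]
  | cons p rest ih =>
    intro b
    obtain ⟨uid, u⟩ := p
    by_cases hb : b = 0
    · rw [pvB_firstEdges]; simp [hb]
    · by_cases hr : rest = []
      · subst hr
        rw [pvB_firstEdges]
        simp [hb, pvEdgesD]
      · have hcond : ¬ (b = 0 ∨ ((uid, u) :: rest).length < 2) := by
          rintro (h | h)
          · exact hb h
          · rw [List.length_cons] at h
            exact hr (List.eq_nil_of_length_eq_zero (by omega))
        have hstep : pvB_firstEdges (PySem.Set.ofList c) ((uid, u) :: rest) b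
            = pvB_mine (PySem.Set.ofList c) uid u b rest
              ++ pvB_firstEdges (PySem.Set.ofList c) rest
                  (b - (pvB_mine (PySem.Set.ofList c) uid u b rest).length) := by
          conv_lhs => rw [pvB_firstEdges]
          rw [if_neg hcond]
        rw [hstep, pvB_mine_eq c uid u rest b (by omega), ih]
        set F := (rest.filter (fun p => pvCond c u p.2)).map
          (fun p => ([uid, p.1], [pvAttr u, pvAttr p.2])) with hFdef
        have hPairs : pvEdgesD c ((uid, u) :: rest) = F ++ pvEdgesD c rest := rfl
        rw [hPairs, List.take_append]
        congr 2
        simp only [List.length_take]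
        omega

theorem pvEdgesD_map (c : List Int) (ids : PySem.Dict (List Int) Int) :
    ∀ (s : List (List Int)),
    pvEdgesD c (s.map (fun t => (ids.getD t 0, t)))
      = (pvPairs c s).map
          (fun e => ([ids.getD e.1 0, ids.getD e.2 0], [pvAttr e.1, pvAttr e.2])) := by
  intro s
  induction s with
  | nil => simp [pvEdgesD, pvPairs]
  | cons u rest ih =>
    show (((rest.map (fun t => (ids.getD t 0, t))).filter (fun p => pvCond c u p.2)).map
          (fun p => ([ids.getD u 0, p.1], [pvAttr u, pvAttr p.2])))
        ++ pvEdgesD c (rest.map (fun t => (ids.getD t 0, t))) = _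
    rw [List.filter_map, ih]
    show _ = (((rest.filter (fun v => pvCond c u v)).map (fun v => (u, v))) ++ pvPairs c rest).map _
    simp [List.map_map, Function.comp_def]

theorem pvPairs_key_le (time : List Int) (c : List Int) :
    ∀ (s : List (List Int)), s.Pairwise (fun a b => pvKey time a ≤ pvKey time b) →
    ∀ e ∈ pvPairs c s, pvKey time e.1 ≤ pvKey time e.2 := by
  intro s
  induction s with
  | nil => intro _ e he; simp [pvPairs] at he
  | cons u rest ih =>
    intro hp e he
    rw [List.pairwise_cons] at hp
    rcases List.mem_append.mp he with hm | hm
    · rcases List.mem_map.mp hm with ⟨v, hv, rfl⟩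
      exact hp.1 v (List.mem_of_mem_filter hv)
    · exact ih hp.2 e hm

-- the sorted group, its first-four qualifying pairs, and the two per-cluster edge lists
def pvSort (time : List Int) (g : List (List Int)) : List (List Int) :=
  PySem.List.sorted g (pvKey time) false

def pvTake4 (time : List Int) (c : List Int) (g : List (List Int)) :
    List (List Int × List Int) :=
  (pvPairs c (pvSort time g)).take 4

def pvE1 (time : List Int) (ids : PySem.Dict (List Int) Int) (c : List Int)
    (g : List (List Int)) : List (List Int) :=
  if g.length < 2 then []
  else (pvTake4 time c g).map (fun e => [ids.getD e.1 0, ids.getD e.2 0])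

def pvE2 (time : List Int) (c : List Int) (g : List (List Int)) : List (List Int) :=
  if g.length < 2 then []
  else (pvTake4 time c g).map (fun e => [pvAttr e.1, pvAttr e.2])

theorem pvA_build_eq (time : List Int) (g : List (List Int)) (c : List Int)
    (t2id : PySem.Dict (List Int) Int) (h2 : ¬ g.length < 2) :
    pvA_buildAttrEdges time g c t2id
      = (pvE1 time t2id c g, pvE2 time c g, pvSort time g) := by
  unfold pvA_buildAttrEdges
  rw [if_neg h2]
  have houter : pvA_outer c (PySem.List.sorted g (pvKey time) false) []
      = pvTake4 time c g := by
    rw [pvA_outer_eq c _ [] (by simp)]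
    rfl
  simp only [houter]
  have hkey : ∀ e ∈ pvTake4 time c g, pvKey time e.1 ≤ pvKey time e.2 := by
    intro e he
    exact pvPairs_key_le time c _ (PySem.List.sorted_pairwise g (pvKey time)) e
      (List.mem_of_mem_take he)
  have hfold : (pvTake4 time c g).foldl (fun (acc : List (List Int) × List (List Int)) e =>
      if pvKey time e.1 > pvKey time e.2
      then (acc.1 ++ [[t2id.getD e.2 0, t2id.getD e.1 0]], acc.2 ++ [[pvAttr e.2, pvAttr e.1]])
      else (acc.1 ++ [[t2id.getD e.1 0, t2id.getD e.2 0]], acc.2 ++ [[pvAttr e.1, pvAttr e.2]]))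
      ([], [])
      = ((pvTake4 time c g).map (fun e => [t2id.getD e.1 0, t2id.getD e.2 0]),
         (pvTake4 time c g).map (fun e => [pvAttr e.1, pvAttr e.2])) := by
    rw [PySem.List.foldl_congr_mem _ _
      (fun (acc : List (List Int) × List (List Int)) e =>
        (acc.1 ++ [[t2id.getD e.1 0, t2id.getD e.2 0]], acc.2 ++ [[pvAttr e.1, pvAttr e.2]])) _
      (by
        intro acc e he
        rw [if_neg (by exact not_lt.mpr (hkey e he))])]
    rw [PySem.List.foldl_prod_mk
      (fun (l : List (List Int)) (e : List Int × List Int) =>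
        l ++ [[t2id.getD e.1 0, t2id.getD e.2 0]])
      (fun (l : List (List Int)) (e : List Int × List Int) =>
        l ++ [[pvAttr e.1, pvAttr e.2]])]
    rw [PySem.List.foldl_append_singleton_eq_map, PySem.List.foldl_append_singleton_eq_map]
    simp
  rw [hfold]
  simp [pvE1, pvE2, pvSort, h2]

theorem pvE1_sort (time : List Int) (ids : PySem.Dict (List Int) Int) (c : List Int)
    (g : List (List Int)) : pvE1 time ids c (pvSort time g) = pvE1 time ids c g := by
  unfold pvE1 pvTake4 pvSort
  rw [PySem.List.sorted_sorted g (pvKey time), PySem.List.length_sorted g (pvKey time) false]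

theorem pvE2_sort (time : List Int) (c : List Int) (g : List (List Int)) :
    pvE2 time c (pvSort time g) = pvE2 time c g := by
  unfold pvE2 pvTake4 pvSort
  rw [PySem.List.sorted_sorted g (pvKey time), PySem.List.length_sorted g (pvKey time) false]

theorem pvA_clusters_fold (time : List Int) (t2id : PySem.Dict (List Int) Int) :
    ∀ (cls : List (List Int)) (vv ev : List (List Int)) (g : List (List Int)),
    cls.foldl (fun (st : List (List Int) × List (List Int) × List (List Int)) c =>
        let r := pvA_buildAttrEdges time st.2.2 c t2id
        (st.1 ++ r.1, st.2.1 ++ r.2.1, r.2.2)) (vv, ev, g)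
      = (vv ++ cls.flatMap (fun c => pvE1 time t2id c g),
         ev ++ cls.flatMap (fun c => pvE2 time c g),
         if cls = [] ∨ g.length < 2 then g else pvSort time g) := by
  intro cls
  induction cls with
  | nil => intro vv ev g; simp
  | cons c cls ih =>
    intro vv ev g
    rw [List.foldl_cons]
    by_cases h2 : g.length < 2
    · have hb : pvA_buildAttrEdges time g c t2id = ([], [], g) := by
        unfold pvA_buildAttrEdges; rw [if_pos h2]
      simp only [hb, List.append_nil]
      rw [ih vv ev g]
      simp [pvE1, pvE2, h2]
    · have hb := pvA_build_eq time g c t2id h2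
      simp only [hb]
      rw [ih]
      have h2' : ¬ (pvSort time g).length < 2 := by
        unfold pvSort; rw [PySem.List.length_sorted]; exact h2
      have hE1 : ∀ c', pvE1 time t2id c' (pvSort time g) = pvE1 time t2id c' g :=
        fun c' => pvE1_sort time t2id c' g
      have hE2 : ∀ c', pvE2 time c' (pvSort time g) = pvE2 time c' g :=
        fun c' => pvE2_sort time c' g
      have hsort : pvSort time (pvSort time g) = pvSort time g := by
        unfold pvSort; exact PySem.List.sorted_sorted g (pvKey time)
      simp [hE1, hE2, hsort, h2, List.flatMap_cons, List.append_assoc]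

theorem pvGroups_step (d : PySem.Dict Int (List (List Int))) (arr : List Int) :
    (match d.get? (PySem.List.pyGetD arr 0 0) with
     | none => d.insert (PySem.List.pyGetD arr 0 0) [arr]
     | some l => d.insert (PySem.List.pyGetD arr 0 0) (l ++ [arr]))
    = d.modify (PySem.List.pyGetD arr 0 0) [] (· ++ [arr]) := by
  cases hg : d.get? (PySem.List.pyGetD arr 0 0) with
  | none =>
    show d.insert (PySem.List.pyGetD arr 0 0) [arr]
        = d.insert (PySem.List.pyGetD arr 0 0) (d.getD (PySem.List.pyGetD arr 0 0) [] ++ [arr])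
    rw [PySem.Dict.getD_of_get?_eq_none d [] hg]
    rfl
  | some l =>
    show d.insert (PySem.List.pyGetD arr 0 0) (l ++ [arr])
        = d.insert (PySem.List.pyGetD arr 0 0) (d.getD (PySem.List.pyGetD arr 0 0) [] ++ [arr])
    rw [PySem.Dict.getD_of_get?_eq_some d [] hg]

theorem pvA_dictByFirst_eq (attrs : List (List Int)) :
    pvA_dictByFirst attrs
      = attrs.foldl (fun d t => d.modify (PySem.List.pyGetD t 0 0) [] (· ++ [t]))
          PySem.Dict.empty := by
  unfold pvA_dictByFirst
  congr 1
  funext d arr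
  exact pvGroups_step d arr

theorem pvB_index_aux :
    ∀ (l : List (List Int)) (ids : PySem.Dict (List Int) Int)
      (g : PySem.Dict Int (List (List Int))) (n : Int),
    l.foldl (fun st t =>
      let p := if st.1.contains t then (st.1, st.2.2) else (st.1.insert t st.2.2, st.2.2 + 1)
      (p.1, st.2.1.modify (PySem.List.pyGetD t 0 0) [] (· ++ [t]), p.2)) (ids, g, n)
    = ((l.foldl (fun p ele =>
          if p.1.contains ele then p else (p.1.insert ele p.2, p.2 + 1)) (ids, n)).1,
       l.foldl (fun d t => d.modify (PySem.List.pyGetD t 0 0) [] (· ++ [t])) g,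
       (l.foldl (fun p ele =>
          if p.1.contains ele then p else (p.1.insert ele p.2, p.2 + 1)) (ids, n)).2) := by
  intro l
  induction l with
  | nil => intro ids g n; rfl
  | cons t rest ih =>
    intro ids g n
    simp only [List.foldl_cons]
    by_cases hc : ids.contains t = true
    · simp only [hc, if_true]
      exact ih ids _ n
    · simp only [hc, if_false, Bool.false_eq_true]
      exact ih _ _ _

theorem pvB_index_eq (attrs : List (List Int)) (num_ent : Int) :
    pvB_index attrs num_ent
      = ((pvA_dictByList attrs num_ent).1, pvA_dictByFirst attrs,
         (pvA_dictByList attrs num_ent).2) := by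
  rw [pvA_dictByFirst_eq]
  unfold pvB_index pvA_dictByList
  exact pvB_index_aux attrs PySem.Dict.empty PySem.Dict.empty num_ent

theorem pvB_group_fold (time : List Int) (ids : PySem.Dict (List Int) Int)
    (cls : List (List Int)) (g : List (List Int)) (acc : List (List Int) × List (List Int)) :
    (if g.length < 2 ∨ cls = [] then acc
     else
       let srt := PySem.List.sorted g (pvKey time) false
       let items := srt.map (fun t => (ids.getD t 0, t))
       cls.foldl (fun (acc : List (List Int) × List (List Int)) c =>
         let cset := PySem.Set.ofList c
         let found := pvB_firstEdges cset items 4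
         (acc.1 ++ found.map (·.1), acc.2 ++ found.map (·.2))) acc)
    = (acc.1 ++ cls.flatMap (fun c => pvE1 time ids c g),
       acc.2 ++ cls.flatMap (fun c => pvE2 time c g)) := by
  by_cases h2 : g.length < 2
  · rw [if_pos (Or.inl h2)]
    have hnil : ∀ cl : List (List Int),
        List.flatMap (fun (_ : List Int) => ([] : List (List Int))) cl = [] := by
      intro cl; simp
    simp [pvE1, h2, pvE2, hnil]
  · by_cases hcl : cls = []
    · subst hcl
      rw [if_pos (Or.inr rfl)]
      simp
    · rw [if_neg (by simp [h2, hcl])]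
      have hstep : ∀ (accp : List (List Int) × List (List Int)) (c : List Int),
          (accp.1 ++ (pvB_firstEdges (PySem.Set.ofList c)
              ((PySem.List.sorted g (pvKey time) false).map (fun t => (ids.getD t 0, t))) 4).map (·.1),
           accp.2 ++ (pvB_firstEdges (PySem.Set.ofList c)
              ((PySem.List.sorted g (pvKey time) false).map (fun t => (ids.getD t 0, t))) 4).map (·.2))
          = (accp.1 ++ pvE1 time ids c g, accp.2 ++ pvE2 time c g) := by
        intro accp c
        have hfound : pvB_firstEdges (PySem.Set.ofList c)
            ((PySem.List.sorted g (pvKey time) false).map (fun t => (ids.getD t 0, t))) 4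
            = (pvTake4 time c g).map
                (fun e => ([ids.getD e.1 0, ids.getD e.2 0], [pvAttr e.1, pvAttr e.2])) := by
          rw [pvB_firstEdges_eq, pvEdgesD_map, ← List.map_take]
          rfl
        rw [hfound]
        unfold pvE1 pvE2
        rw [if_neg h2, if_neg h2, List.map_map, List.map_map]
        rfl
      rw [PySem.List.foldl_congr_mem _ _
        (fun (accp : List (List Int) × List (List Int)) c =>
          (accp.1 ++ pvE1 time ids c g, accp.2 ++ pvE2 time c g)) _
        (fun accp c _ => hstep accp c)]
      rw [PySem.List.foldl_prod_mk
        (fun (l : List (List Int)) (c : List Int) => l ++ pvE1 time ids c g)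
        (fun (l : List (List Int)) (c : List Int) => l ++ pvE2 time c g)]
      rw [PySem.List.foldl_append_eq_flatMap, PySem.List.foldl_append_eq_flatMap]

-- the common closed form both mains reduce to
def pvCanon (num_ent : Int) (time : List Int) (attrs cls : List (List Int)) :
    List (List Int) × List (List Int) :=
  let ids := (pvA_dictByList attrs num_ent).1
  let r1 := (pvA_dictByFirst attrs).items.flatMap
    (fun kv => cls.flatMap (fun c => pvE1 time ids c kv.2))
  let r2 := (pvA_dictByFirst attrs).items.flatMap
    (fun kv => cls.flatMap (fun c => pvE2 time c kv.2))
  if r1 = [] then ([[num_ent, num_ent + 1]], [[0, 1]]) else (r1, r2)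

theorem pvLen12 (num_ent : Int) (time : List Int) (attrs cls : List (List Int)) :
    ((pvA_dictByFirst attrs).items.flatMap
      (fun kv => cls.flatMap (fun c => pvE1 time (pvA_dictByList attrs num_ent).1 c kv.2))).length
    = ((pvA_dictByFirst attrs).items.flatMap
      (fun kv => cls.flatMap (fun c => pvE2 time c kv.2))).length := by
  rw [List.length_flatMap, List.length_flatMap]
  congr 1
  apply List.map_congr_left
  intro kv _
  rw [List.length_flatMap, List.length_flatMap]
  congr 1
  apply List.map_congr_left
  intro c _
  unfold pvE1 pvE2
  split <;> simp

theorem pvA_main_eq (num_ent : Int) (time : List Int) (attrs cls : List (List Int)) :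
    build_value_edges_in_cluster num_ent time attrs cls = pvCanon num_ent time attrs cls := by
  simp only [build_value_edges_in_cluster, pvCanon]
  rw [PySem.List.foldl_congr_mem _ _
    (fun (acc : List (List Int) × List (List Int)) (kv : Int × List (List Int)) =>
      (acc.1 ++ cls.flatMap (fun c => pvE1 time (pvA_dictByList attrs num_ent).1 c kv.2),
       acc.2 ++ cls.flatMap (fun c => pvE2 time c kv.2))) _
    (by
      intro acc kv _
      show (let st := cls.foldl _ (acc.1, acc.2, kv.2); (st.1, st.2.1)) = _
      rw [pvA_clusters_fold time (pvA_dictByList attrs num_ent).1 cls acc.1 acc.2 kv.2])]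
  rw [PySem.List.foldl_prod_mk
    (fun (l : List (List Int)) (kv : Int × List (List Int)) =>
      l ++ cls.flatMap (fun c => pvE1 time (pvA_dictByList attrs num_ent).1 c kv.2))
    (fun (l : List (List Int)) (kv : Int × List (List Int)) =>
      l ++ cls.flatMap (fun c => pvE2 time c kv.2))]
  rw [PySem.List.foldl_append_eq_flatMap, PySem.List.foldl_append_eq_flatMap]
  simp only [List.nil_append]
  have hlen := pvLen12 num_ent time attrs cls
  by_cases h : (pvA_dictByFirst attrs).items.flatMap
      (fun kv => cls.flatMap (fun c => pvE1 time (pvA_dictByList attrs num_ent).1 c kv.2)) = []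
  · rw [if_pos h, h]
    have h2 : ((pvA_dictByFirst attrs).items.flatMap
        (fun kv => cls.flatMap (fun c => pvE2 time c kv.2))) = [] := by
      rw [h] at hlen
      exact List.eq_nil_of_length_eq_zero hlen.symm
    rw [h2]
    simp
  · rw [if_neg h]
    have h1 : 0 < ((pvA_dictByFirst attrs).items.flatMap
        (fun kv => cls.flatMap (fun c =>
          pvE1 time (pvA_dictByList attrs num_ent).1 c kv.2))).length :=
      List.length_pos_iff.mpr h
    have h2 : 0 < ((pvA_dictByFirst attrs).items.flatMap
        (fun kv => cls.flatMap (fun c => pvE2 time c kv.2))).length := hlen ▸ h1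
    rw [if_pos (by simp only [gt_iff_lt, h1, h2, decide_true, Bool.and_self])]

theorem pvB_main_eq (num_ent : Int) (time : List Int) (attrs cls : List (List Int)) :
    build_value_edges_in_cluster_alt num_ent time attrs cls = pvCanon num_ent time attrs cls := by
  simp only [build_value_edges_in_cluster_alt, pvCanon, pvB_index_eq]
  rw [PySem.List.foldl_congr_mem _ _
    (fun (acc : List (List Int) × List (List Int)) (kv : Int × List (List Int)) =>
      (acc.1 ++ cls.flatMap (fun c => pvE1 time (pvA_dictByList attrs num_ent).1 c kv.2),
       acc.2 ++ cls.flatMap (fun c => pvE2 time c kv.2))) _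
    (by
      intro acc kv _
      exact pvB_group_fold time (pvA_dictByList attrs num_ent).1 cls kv.2 acc)]
  rw [PySem.List.foldl_prod_mk
    (fun (l : List (List Int)) (kv : Int × List (List Int)) =>
      l ++ cls.flatMap (fun c => pvE1 time (pvA_dictByList attrs num_ent).1 c kv.2))
    (fun (l : List (List Int)) (kv : Int × List (List Int)) =>
      l ++ cls.flatMap (fun c => pvE2 time c kv.2))]
  rw [PySem.List.foldl_append_eq_flatMap, PySem.List.foldl_append_eq_flatMap]
  simp only [List.nil_append]
  by_cases h : (pvA_dictByFirst attrs).items.flatMap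
      (fun kv => cls.flatMap (fun c => pvE1 time (pvA_dictByList attrs num_ent).1 c kv.2)) = []
  · rw [if_pos h]
    simp [h]
  · rw [if_neg h]
    simp [h]

-- ===== VERDICT (by name: the statement is the Claim_ definition above) =====
theorem build_value_edges_in_cluster_spec : Claim_equal_build_value_edges_in_cluster := by
  intro num_ent time_id2value attribute_triples clusters _ _
  unfold Spec_build_value_edges_in_cluster
  rw [pvA_main_eq, pvB_main_eq]
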